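-- pv_equiv track=rewrite | github.com/Mordekay15/price-calculation | core/parser.py | _join_header_rows
-- ===== SOURCE A (Python) =====
-- def clean(value: str | None) -> str:
--     """Strip whitespace and newlines from a cell value."""
--     return (value or "").replace("\n", " ").strip()
--
-- def _join_header_rows(table: list, max_header_rows: int = 3) -> list[str]:
--     """Concatenate the first few rows of a table per column to handle multi-line headers."""
--     if not table:
--         return []
--     n_cols = max((len(r) for r in table[:max_header_rows]), default=0)
--     joined = [""] * n_cols
--     for r in table[:max_header_rows]:
--         for c in range(min(len(r), n_cols)):
--             joined[c] = (joined[c] + " " + clean(r[c])).strip()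
--     return joined
-- ===== SOURCE B (Python) =====
-- def clean(value: str | None) -> str:
--     """Strip whitespace and newlines from a cell value."""
--     return (value or "").replace("\n", " ").strip()
--
-- def _join_header_rows(table: list, max_header_rows: int = 3) -> list[str]:
--     """Concatenate the first few rows of a table per column to handle multi-line headers."""
--     # Destructive transpose: repeatedly pop the head cell of every remaining row;
--     # each round of pops is one output column.
--     queues = [list(r) for r in table[:max_header_rows]]
--     out = []
--     while any(queues):
--         tokens = [clean(q.pop(0)) for q in queues if q]
--         out.append(" ".join(t for t in tokens if t))
--     return out
-- ===== Notes on version B (the rewrite author's own statement) =====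
-- stated objective: alternative
-- what changed: A's row-major loop mutating an indexed accumulator with a running strip() per cell is replaced by a destructive transpose: repeatedly pop the head cell of every remaining row, each round of pops becoming one joined output column; no column count, indices or mutable output slots are computed.
import Mathlib
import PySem

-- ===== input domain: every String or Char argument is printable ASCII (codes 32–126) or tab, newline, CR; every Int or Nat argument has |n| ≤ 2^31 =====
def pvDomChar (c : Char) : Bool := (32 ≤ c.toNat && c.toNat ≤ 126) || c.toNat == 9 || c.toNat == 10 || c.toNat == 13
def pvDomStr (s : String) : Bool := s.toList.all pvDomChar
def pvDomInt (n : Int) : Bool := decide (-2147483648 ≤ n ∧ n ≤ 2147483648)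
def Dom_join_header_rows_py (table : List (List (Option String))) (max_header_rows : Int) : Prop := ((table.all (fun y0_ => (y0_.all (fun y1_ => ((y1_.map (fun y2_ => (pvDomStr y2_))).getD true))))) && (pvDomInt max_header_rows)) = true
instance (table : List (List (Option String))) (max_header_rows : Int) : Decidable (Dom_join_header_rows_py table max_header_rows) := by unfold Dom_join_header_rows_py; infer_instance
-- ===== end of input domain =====

-- B replaces A's row-major index-mutating accumulator by a destructive transpose (pop the head of every remaining row per output column); objective: alternative.

-- ===== PORT A =====
-- clean(value): (value or "").replace("\n", " ").strip()  (a None/"" cell both give "")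
def cleanPy (v : Option String) : String :=
  PySem.Str.strip (PySem.Str.replace (v.getD "") "\n" " ")

-- _join_header_rows, row-major loop with a mutable `joined` list.
-- len(r) values are Nats, so n_cols is computed as maxD over Nat lengths (Python max(..., default=0));
-- joined[c] / r[c] reads are always in range (c < len(joined), c < len(r)), ported as getD.
def join_header_rows_py (table : List (List (Option String))) (max_header_rows : Int) : List String :=
  if table = [] then []
  else
    let ncols : Nat :=
      PySem.List.maxD ((PySem.List.slice table none (some max_header_rows)).map List.length) id 0
    let joined : List String := List.replicate ncols ""
    (PySem.List.slice table none (some max_header_rows)).foldl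
      (fun joined r =>
        (List.range (min r.length ncols)).foldl
          (fun joined c =>
            joined.set c (PySem.Str.strip (joined.getD c "" ++ " " ++ cleanPy (r.getD c none))))
          joined)
      joined

-- ===== PORT B =====
-- termination measure for the while-loop: total number of remaining cells
theorem pvSumTailLt (qs : List (List (Option String)))
    (h : qs.any (fun q => !q.isEmpty) = true) :
    ((qs.map List.tail).map List.length).sum < (qs.map List.length).sum := by
  induction qs with
  | nil => simp at h
  | cons q qs ih =>
      have hle : ∀ rs : List (List (Option String)),
          ((rs.map List.tail).map List.length).sum ≤ (rs.map List.length).sum := by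
        intro rs
        induction rs with
        | nil => simp
        | cons r rs ihr =>
            simp only [List.map_cons, List.sum_cons]
            have : r.tail.length ≤ r.length := by
              rw [List.length_tail]; omega
            omega
      simp only [List.any_cons, Bool.or_eq_true] at h
      simp only [List.map_cons, List.sum_cons]
      rcases h with h | h
      · have : q.tail.length < q.length := by
          rw [List.length_tail]
          cases q with
          | nil => simp at h
          | cons a t => simp
        have := hle qs
        omega
      · have : q.tail.length ≤ q.length := by rw [List.length_tail]; omega
        have := ih h
        omega

-- while any(queues): pop the head of each nonempty queue, clean it, join the non-empty tokens
def bLoop (qs : List (List (Option String))) : List String :=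
  if h : qs.any (fun q => !q.isEmpty) = true then
    PySem.Str.join " "
        (((qs.filter (fun q => !q.isEmpty)).map (fun q => cleanPy (q.headD none))).filter
          (fun t => decide (t ≠ "")))
      :: bLoop (qs.map List.tail)
  else []
termination_by (qs.map List.length).sum
decreasing_by simpa using pvSumTailLt qs h

-- queues = [list(r) for r in table[:max_header_rows]]; then the pop loop
def join_header_rows_py_alt (table : List (List (Option String))) (max_header_rows : Int) : List String :=
  bLoop (PySem.List.slice table none (some max_header_rows))

-- ===== PRECONDITION & SPEC =====
def Spec_join_header_rows_py (table : List (List (Option String))) (max_header_rows : Int) (out : List String) : Prop := out = join_header_rows_py_alt table max_header_rows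
instance (table : List (List (Option String))) (max_header_rows : Int) (out : List String) : Decidable (Spec_join_header_rows_py table max_header_rows out) := by unfold Spec_join_header_rows_py; infer_instance

-- ===== CLAIM (what is proved, stated in full; the proofs are below) =====
def Claim_equal_join_header_rows_py : Prop := ∀ (table : List (List (Option String))) (max_header_rows : Int), Dom_join_header_rows_py table max_header_rows → Spec_join_header_rows_py table max_header_rows (join_header_rows_py table max_header_rows)

-- ===== LEMMAS AND PROOFS =====

-- the common column form both programs are reduced to: column c of the bounded rows, cleaned,
-- empties dropped, joined with " "
def colJoin (qs : List (List (Option String))) (c : Nat) : String :=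
  PySem.Str.join " "
    (((qs.filter (fun r => decide (c < r.length))).map (fun r => cleanPy (r.getD c none))).filter
      (fun t => decide (t ≠ "")))

-- a list of chars with no leading and no trailing whitespace
def StrippedC (cs : List Char) : Prop :=
  (∀ c ∈ cs.head?, PySem.Chars.isspace c = false) ∧
  (∀ c ∈ cs.getLast?, PySem.Chars.isspace c = false)

-- the char-level accumulator step of A:  strip (joined + " " + token)
def stepC (a t : List Char) : List Char := PySem.Chars.strip (a ++ ' ' :: t)

-- joining two already-joined column pieces, skipping empties
def combC (a b : List Char) : List Char :=
  if a = [] then b else if b = [] then a else a ++ ' ' :: b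

-- B's value of one column, char level: " ".join of the non-empty tokens
def JC (ts : List (List Char)) : List Char :=
  PySem.Chars.join [' '] (ts.filter (fun t => !t.isEmpty))

theorem lstrip_eq_self (cs : List Char)
    (h : ∀ c ∈ cs.head?, PySem.Chars.isspace c = false) :
    PySem.Chars.lstrip cs = cs := by
  cases cs with
  | nil => rfl
  | cons c cs' =>
      simp only [PySem.Chars.lstrip, List.dropWhile_cons]
      rw [h c (by simp)]
      simp

theorem rstrip_eq_self (cs : List Char)
    (h : ∀ c ∈ cs.getLast?, PySem.Chars.isspace c = false) :
    PySem.Chars.rstrip cs = cs := by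
  have : PySem.Chars.lstrip cs.reverse = cs.reverse := by
    apply lstrip_eq_self
    simpa [List.head?_reverse] using h
  simp only [PySem.Chars.rstrip, PySem.Chars.lstrip] at this ⊢
  rw [this, List.reverse_reverse]

theorem strip_eq_self (cs : List Char) (h : StrippedC cs) :
    PySem.Chars.strip cs = cs := by
  simp only [PySem.Chars.strip]
  rw [lstrip_eq_self cs h.1, rstrip_eq_self cs h.2]

theorem head?_dropWhile_isspace (cs : List Char) :
    ∀ c ∈ (List.dropWhile PySem.Chars.isspace cs).head?, PySem.Chars.isspace c = false := by
  induction cs with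
  | nil => simp
  | cons c cs' ih =>
      intro d hd
      rw [List.dropWhile_cons] at hd
      by_cases h : PySem.Chars.isspace c = true
      · rw [if_pos h] at hd; exact ih d hd
      · rw [if_neg h] at hd
        simp only [List.head?_cons, Option.mem_def, Option.some.injEq] at hd
        subst hd
        simpa using h

theorem strippedC_strip (cs : List Char) : StrippedC (PySem.Chars.strip cs) := by
  constructor
  · intro c hc
    have hsuf : List.dropWhile PySem.Chars.isspace (PySem.Chars.lstrip cs).reverse <:+
        (PySem.Chars.lstrip cs).reverse := List.dropWhile_suffix _
    obtain ⟨u, hu⟩ := hsuf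
    have hpre : PySem.Chars.strip cs ++ u.reverse = PySem.Chars.lstrip cs := by
      have := congrArg List.reverse hu
      simpa [PySem.Chars.strip, PySem.Chars.rstrip, PySem.Chars.lstrip] using this
    have hhead : (PySem.Chars.lstrip cs).head? = some c := by
      rw [← hpre, List.head?_append, hc]
      rfl
    exact head?_dropWhile_isspace cs c (by simpa [PySem.Chars.lstrip] using hhead)
  · intro c hc
    have : ((PySem.Chars.strip cs).reverse).head? = some c := by
      rw [List.head?_reverse]; exact hc
    have h2 : (List.dropWhile PySem.Chars.isspace (PySem.Chars.lstrip cs).reverse).head? = some c := by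
      simpa [PySem.Chars.strip, PySem.Chars.rstrip] using this
    exact head?_dropWhile_isspace _ c h2

theorem strippedC_nil : StrippedC [] := by constructor <;> simp

theorem strippedC_comb (a b : List Char) (ha : StrippedC a) (hb : StrippedC b) :
    StrippedC (combC a b) := by
  unfold combC
  by_cases h1 : a = []
  · simpa [h1] using hb
  by_cases h2 : b = []
  · simpa [h1, h2] using ha
  rw [if_neg h1, if_neg h2]
  constructor
  · intro c hc
    rw [List.head?_append] at hc
    cases hha : a.head? with
    | none => exact absurd (List.head?_eq_none_iff.mp hha) h1
    | some d =>
        rw [hha] at hc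
        rw [Option.some_or] at hc
        injection hc with hc
        subst hc
        exact ha.1 d (by simp [hha])
  · intro c hc
    have : ((' ' :: b).getLast? ).or a.getLast? = some c := by
      rw [← List.getLast?_append]; exact hc
    have hbl : (' ' :: b).getLast? = b.getLast? := by
      cases b with
      | nil => exact absurd rfl h2
      | cons x xs => exact List.getLast?_cons_cons
    rw [hbl] at this
    cases hhb : b.getLast? with
    | none => exact absurd (List.getLast?_eq_none_iff.mp hhb) h2
    | some d =>
        rw [hhb] at this
        rw [Option.some_or] at this
        injection this with this
        subst this
        exact hb.2 d (by simp [hhb])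

theorem stepC_eq_comb (a t : List Char) (ha : StrippedC a) (ht : StrippedC t) :
    stepC a t = combC a t := by
  unfold stepC combC
  by_cases h1 : a = []
  · subst h1
    simp only [List.nil_append]
    show PySem.Chars.strip (' ' :: t) = t
    simp only [PySem.Chars.strip, PySem.Chars.lstrip, List.dropWhile_cons]
    rw [if_pos (by rfl : PySem.Chars.isspace ' ' = true)]
    have hl : List.dropWhile PySem.Chars.isspace t = t := lstrip_eq_self t ht.1
    rw [hl]
    exact rstrip_eq_self t ht.2
  by_cases h2 : t = []
  · subst h2
    rw [if_neg h1, if_pos rfl]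
    show PySem.Chars.strip (a ++ [' ']) = a
    simp only [PySem.Chars.strip]
    have hl : PySem.Chars.lstrip (a ++ [' ']) = a ++ [' '] := by
      apply lstrip_eq_self
      intro c hc
      rw [List.head?_append] at hc
      cases hha : a.head? with
      | none => exact absurd (List.head?_eq_none_iff.mp hha) h1
      | some d =>
          rw [hha] at hc
          rw [Option.some_or] at hc
          injection hc with hc
          subst hc
          exact ha.1 d (by simp [hha])
    rw [hl]
    have hra : List.dropWhile PySem.Chars.isspace a.reverse = a.reverse := by
      have := rstrip_eq_self a ha.2
      simp only [PySem.Chars.rstrip] at this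
      have := congrArg List.reverse this
      simpa using this
    simp only [PySem.Chars.rstrip, List.reverse_append]
    simp only [List.reverse_singleton, List.singleton_append, List.dropWhile_cons]
    rw [if_pos (by rfl : PySem.Chars.isspace ' ' = true), hra, List.reverse_reverse]
  · rw [if_neg h1, if_neg h2]
    exact strip_eq_self _ (by
      have := strippedC_comb a t ha ht
      simpa [combC, h1, h2] using this)

theorem comb_assoc (a t u : List Char) : combC (combC a t) u = combC a (combC t u) := by
  unfold combC
  by_cases h1 : a = [] <;> by_cases h2 : t = [] <;> by_cases h3 : u = [] <;>
    simp [h1, h2, h3]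

theorem join_cons_ne_nil (q : List Char) (rs : List (List Char)) (hq : q ≠ []) :
    PySem.Chars.join [' '] (q :: rs) ≠ [] := by
  cases rs with
  | nil => simpa [PySem.Chars.join_singleton] using hq
  | cons r rs' =>
      rw [PySem.Chars.join_cons_cons]
      cases q with
      | nil => exact absurd rfl hq
      | cons c q' => simp

theorem JC_cons (t : List Char) (ts : List (List Char)) : JC (t :: ts) = combC t (JC ts) := by
  unfold JC
  by_cases ht : t = []
  · subst ht
    simp [combC]
  · rw [List.filter_cons_of_pos (by simpa using ht)]
    cases hrest : ts.filter (fun t => !t.isEmpty) with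
    | nil =>
        simp [PySem.Chars.join_singleton, PySem.Chars.join_nil, combC, ht]
    | cons q rs =>
        rw [PySem.Chars.join_cons_cons]
        have hq : q ≠ [] := by
          have : q ∈ ts.filter (fun t => !t.isEmpty) := by rw [hrest]; simp
          have := List.of_mem_filter this
          simpa using this
        have hne : PySem.Chars.join [' '] (q :: rs) ≠ [] := join_cons_ne_nil q rs hq
        simp only [combC, if_neg ht, if_neg hne]
        simp

theorem foldl_stepC_eq (ts : List (List Char)) :
    ∀ a, StrippedC a → (∀ t ∈ ts, StrippedC t) →
    ts.foldl stepC a = combC a (JC ts) := by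
  induction ts with
  | nil =>
      intro a _ _
      simp only [List.foldl_nil, JC, List.filter_nil, PySem.Chars.join_nil, combC]
      by_cases h : a = [] <;> simp [h]
  | cons t ts ih =>
      intro a ha hts
      have ht : StrippedC t := hts t (by simp)
      rw [List.foldl_cons, stepC_eq_comb a t ha ht]
      rw [ih (combC a t) (strippedC_comb a t ha ht) (fun x hx => hts x (by simp [hx]))]
      rw [comb_assoc, ← JC_cons]

-- ---- index-wise characterisation of A's mutable loops ----

theorem inner_len (g : Nat → String → String) :
    ∀ (m : Nat) (l : List String),
      ((List.range m).foldl (fun l c => l.set c (g c (l.getD c ""))) l).length = l.length := by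
  intro m
  induction m with
  | zero => intro l; simp
  | succ m ih =>
      intro l
      rw [List.range_succ, List.foldl_append]
      simp only [List.foldl_cons, List.foldl_nil, List.length_set]
      exact ih l

theorem inner_getD (g : Nat → String → String) :
    ∀ (m : Nat) (l : List String) (j : Nat),
      ((List.range m).foldl (fun l c => l.set c (g c (l.getD c ""))) l).getD j "" =
        if j < m ∧ j < l.length then g j (l.getD j "") else l.getD j "" := by
  intro m
  induction m with
  | zero => intro l j; simp
  | succ m ih =>
      intro l j
      rw [List.range_succ, List.foldl_append]
      simp only [List.foldl_cons, List.foldl_nil]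
      have hlen := inner_len g m l
      have hm := ih l m
      rw [if_neg (by omega)] at hm
      rw [List.getD_eq_getElem?_getD, List.getElem?_set, hlen]
      by_cases hjm : m = j
      · subst hjm
        by_cases hml : m < l.length
        · rw [if_pos rfl, if_pos hml, if_pos ⟨by omega, hml⟩, hm]
          rfl
        · rw [if_pos rfl, if_neg hml, if_neg (by omega)]
          have : l.getD m "" = "" := by
            rw [List.getD_eq_getElem?_getD, List.getElem?_eq_none (by omega)]
            rfl
          rw [this]
          rfl
      · rw [if_neg hjm, ← List.getD_eq_getElem?_getD, ih l j]
        have hiff : (j < m ∧ j < l.length) ↔ (j < m + 1 ∧ j < l.length) := by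
          constructor
          · rintro ⟨h1, h2⟩; exact ⟨by omega, h2⟩
          · rintro ⟨h1, h2⟩
            refine ⟨?_, h2⟩
            omega
        rw [if_congr hiff rfl rfl]

-- the string-level accumulator step of A
def stepS (a t : String) : String := PySem.Str.strip (a ++ " " ++ t)

theorem outer_len (ncols : Nat) :
    ∀ (rows : List (List (Option String))) (joined : List String),
      (rows.foldl (fun joined r =>
          (List.range (min r.length ncols)).foldl
            (fun joined c =>
              joined.set c (PySem.Str.strip (joined.getD c "" ++ " " ++ cleanPy (r.getD c none))))
            joined) joined).length = joined.length := by
  intro rows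
  induction rows with
  | nil => intro joined; simp
  | cons r rows ih =>
      intro joined
      rw [List.foldl_cons, ih]
      exact inner_len (fun c s => PySem.Str.strip (s ++ " " ++ cleanPy (r.getD c none)))
        (min r.length ncols) joined

theorem outer_getD (ncols : Nat) :
    ∀ (rows : List (List (Option String))) (joined : List String) (c : Nat),
      c < ncols → joined.length = ncols →
      (rows.foldl (fun joined r =>
          (List.range (min r.length ncols)).foldl
            (fun joined c =>
              joined.set c (PySem.Str.strip (joined.getD c "" ++ " " ++ cleanPy (r.getD c none))))
            joined) joined).getD c "" =
      rows.foldl (fun a r => if c < r.length then stepS a (cleanPy (r.getD c none)) else a)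
        (joined.getD c "") := by
  intro rows
  induction rows with
  | nil => intro joined c _ _; simp
  | cons r rows ih =>
      intro joined c hc hlen
      rw [List.foldl_cons, List.foldl_cons]
      have hlen' : ((List.range (min r.length ncols)).foldl
          (fun joined c =>
            joined.set c (PySem.Str.strip (joined.getD c "" ++ " " ++ cleanPy (r.getD c none))))
          joined).length = ncols := by
        rw [inner_len (fun c s => PySem.Str.strip (s ++ " " ++ cleanPy (r.getD c none)))]
        exact hlen
      rw [ih _ c hc hlen']
      have hinner := inner_getD (fun c s => PySem.Str.strip (s ++ " " ++ cleanPy (r.getD c none)))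
        (min r.length ncols) joined c
      rw [hinner]
      have hcond : (c < min r.length ncols ∧ c < joined.length) ↔ c < r.length := by
        rw [hlen]
        omega
      rw [if_congr hcond rfl rfl]
      rfl

-- ---- transport from strings to char lists ----

theorem stepS_toList (x y : String) : (stepS x y).toList = stepC x.toList y.toList := by
  simp only [stepS, stepC, PySem.Str.toList_strip, String.toList_append]
  congr 1
  rw [show (" " : String).toList = [' '] from rfl]
  simp

theorem foldl_stepS_toList (ts : List String) (a : String) :
    (ts.foldl stepS a).toList = (ts.map String.toList).foldl stepC a.toList := by
  rw [List.foldl_map]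
  exact (List.foldl_hom String.toList (fun x y => (stepS_toList x y).symm)).symm

theorem strippedC_clean (v : Option String) : StrippedC (cleanPy v).toList := by
  unfold cleanPy
  rw [PySem.Str.toList_strip]
  exact strippedC_strip _

theorem fold_tokens_eq_join (ts : List String) (h : ∀ t ∈ ts, StrippedC t.toList) :
    ts.foldl stepS "" = PySem.Str.join " " (ts.filter (fun t => decide (t ≠ ""))) := by
  apply String.toList_inj.mp
  rw [foldl_stepS_toList]
  have h0 : ("" : String).toList = [] := rfl
  rw [h0, foldl_stepC_eq (ts.map String.toList) [] strippedC_nil (by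
    intro t ht
    rw [List.mem_map] at ht
    obtain ⟨s, hs, rfl⟩ := ht
    exact h s hs)]
  have hcomb : combC [] (JC (ts.map String.toList)) = JC (ts.map String.toList) := by
    simp [combC]
  rw [hcomb, PySem.Str.toList_join]
  unfold JC
  have hsep : (" " : String).toList = [' '] := rfl
  rw [hsep]
  congr 1
  rw [List.filter_map]
  congr 1
  apply List.filter_congr
  intro t _
  simp only [Function.comp_apply]
  by_cases h : t = "" <;> simp [h]

-- ---- A equals the column form ----

theorem A_eq_colJoin (table : List (List (Option String))) (max_header_rows : Int) :
    join_header_rows_py table max_header_rows =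
      (List.range (PySem.List.maxD
          ((PySem.List.slice table none (some max_header_rows)).map List.length) id 0)).map
        (colJoin (PySem.List.slice table none (some max_header_rows))) := by
  unfold join_header_rows_py
  by_cases htab : table = []
  · subst htab
    simp [PySem.List.slice, PySem.List.maxD, PySem.List.max?]
  rw [if_neg htab]
  set rows := PySem.List.slice table none (some max_header_rows) with hrows
  set ncols : Nat := PySem.List.maxD (rows.map List.length) id 0 with hncols
  apply List.ext_getElem
  · rw [outer_len ncols rows (List.replicate ncols "")]
    simp
  · intro i h1 h2
    have hlenA : (rows.foldl (fun joined r =>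
        (List.range (min r.length ncols)).foldl
          (fun joined c =>
            joined.set c (PySem.Str.strip (joined.getD c "" ++ " " ++ cleanPy (r.getD c none))))
          joined) (List.replicate ncols "")).length = ncols := by
      rw [outer_len ncols rows (List.replicate ncols "")]
      simp
    have hi : i < ncols := by rw [← hlenA]; exact h1
    rw [← List.getD_eq_getElem _ "" h1]
    rw [outer_getD ncols rows (List.replicate ncols "") i hi (by simp)]
    have hrep : (List.replicate ncols ("" : String)).getD i "" = "" := by
      rw [List.getD_eq_getElem _ "" (by simpa using hi)]
      simp
    rw [hrep]
    have hfilter : rows.foldl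
        (fun a r => if i < r.length then stepS a (cleanPy (r.getD i none)) else a) "" =
        ((rows.filter (fun r => decide (i < r.length))).map
          (fun r => cleanPy (r.getD i none))).foldl stepS "" := by
      rw [List.foldl_map, List.foldl_filter]
      congr 1
      funext a r
      simp only [decide_eq_true_eq]
    rw [hfilter]
    rw [fold_tokens_eq_join _ (by
      intro t ht
      rw [List.mem_map] at ht
      obtain ⟨r, _, rfl⟩ := ht
      exact strippedC_clean _)]
    simp [colJoin]

-- ---- B's queue loop equals the column form ----

-- running max over the row lengths, foldr style
def ML (qs : List (List (Option String))) : Nat := (qs.map List.length).foldr max 0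

theorem foldl_max_eq (t : List Nat) : ∀ x : Nat, t.foldl max x = max x (t.foldr max 0) := by
  induction t with
  | nil => intro x; simp
  | cons a t ih =>
      intro x
      rw [List.foldl_cons, ih (max x a), List.foldr_cons]
      omega

theorem maxD_eq_ML (qs : List (List (Option String))) :
    PySem.List.maxD (qs.map List.length) id 0 = ML qs := by
  cases hq : qs.map List.length with
  | nil =>
      unfold ML
      rw [hq]
      simp [PySem.List.maxD, PySem.List.max?]
  | cons x t =>
      unfold ML
      rw [hq]
      have h1 : PySem.List.max? (x :: t) (fun y => y) = some (t.foldl max x) :=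
        PySem.List.max?_id_cons x t
      have h2 : PySem.List.maxD (x :: t) id 0 = t.foldl max x := by
        simp only [PySem.List.maxD]
        have hid : PySem.List.max? (x :: t) id = some (t.foldl max x) := h1
        rw [hid]
        rfl
      rw [h2, foldl_max_eq, List.foldr_cons]

theorem ML_tail (qs : List (List (Option String))) : ML (qs.map List.tail) = ML qs - 1 := by
  induction qs with
  | nil => simp [ML]
  | cons q qs ih =>
      simp only [ML, List.map_cons, List.foldr_cons] at *
      rw [ih]
      have : q.tail.length = q.length - 1 := List.length_tail
      omega

theorem ML_zero_iff (qs : List (List (Option String))) :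
    ML qs = 0 ↔ qs.any (fun q => !q.isEmpty) = false := by
  induction qs with
  | nil => simp [ML]
  | cons q qs ih =>
      simp only [ML, List.map_cons, List.foldr_cons, List.any_cons, Bool.or_eq_false_iff] at *
      constructor
      · intro h
        have h1 : q.length = 0 := by omega
        have h2 : (qs.map List.length).foldr max 0 = 0 := by omega
        refine ⟨?_, ih.mp h2⟩
        cases q with
        | nil => simp
        | cons a t => simp at h1
      · rintro ⟨h1, h2⟩
        have hq : q.length = 0 := by
          cases q with
          | nil => simp
          | cons a t => simp at h1
        have := ih.mpr h2
        omega

theorem getD_zero_headD (r : List (Option String)) : r.getD 0 none = r.headD none := by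
  cases r <;> rfl

theorem colJoin_succ (qs : List (List (Option String))) (c : Nat) :
    colJoin qs (c + 1) = colJoin (qs.map List.tail) c := by
  unfold colJoin
  refine congrArg (PySem.Str.join " ") ?_
  refine congrArg (List.filter (fun t => decide (t ≠ ""))) ?_
  rw [List.filter_map]
  rw [List.map_map]
  have hpred : (fun r : List (Option String) => decide (c + 1 < r.length)) =
      (fun r => decide (c < r.length)) ∘ List.tail := by
    funext r
    simp only [Function.comp_apply]
    have : r.tail.length = r.length - 1 := List.length_tail
    cases r with
    | nil => simp
    | cons a t => simp only [List.tail_cons, List.length_cons]; rw [decide_eq_decide]; omega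
  rw [hpred]
  apply List.map_congr_left
  intro r hr
  simp only [Function.comp_apply]
  congr 1
  cases r with
  | nil => rfl
  | cons a t => rfl

theorem bLoop_eq_colJoin :
    ∀ (n : Nat) (qs : List (List (Option String))), ML qs = n →
      bLoop qs = (List.range n).map (colJoin qs) := by
  intro n
  induction n with
  | zero =>
      intro qs h
      rw [bLoop.eq_def]
      rw [dif_neg (by rw [(ML_zero_iff qs).mp h]; simp)]
      simp
  | succ n ih =>
      intro qs h
      have hany : qs.any (fun q => !q.isEmpty) = true := by
        by_contra hc
        have : qs.any (fun q => !q.isEmpty) = false := by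
          cases hv : qs.any (fun q => !q.isEmpty) with
          | false => rfl
          | true => exact absurd hv hc
        have := (ML_zero_iff qs).mpr this
        omega
      rw [bLoop.eq_def, dif_pos hany]
      have htail : ML (qs.map List.tail) = n := by
        rw [ML_tail, h]
        omega
      rw [ih (qs.map List.tail) htail]
      rw [List.range_succ_eq_map, List.map_cons, List.map_map]
      refine congrArg₂ List.cons ?_ ?_
      · -- head: colJoin qs 0 is the joined cleaned heads of the nonempty queues
        unfold colJoin
        refine congrArg (PySem.Str.join " ") ?_
        refine congrArg (List.filter (fun t => decide (t ≠ ""))) ?_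
        have hpred : (fun r : List (Option String) => decide (0 < r.length)) =
            (fun q : List (Option String) => !q.isEmpty) := by
          funext r
          cases r <;> simp
        rw [hpred]
        apply List.map_congr_left
        intro r _
        rw [getD_zero_headD]
      · apply List.map_congr_left
        intro c _
        simp only [Function.comp_apply]
        exact (colJoin_succ qs c).symm

-- ===== VERDICT (by name: the statement is the Claim_ definition above) =====
theorem join_header_rows_py_spec : Claim_equal_join_header_rows_py := by
  intro table max_header_rows _
  unfold Spec_join_header_rows_py join_header_rows_py_alt
  rw [A_eq_colJoin, maxD_eq_ML]
  exact (bLoop_eq_colJoin (ML (PySem.List.slice table none (some max_header_rows)))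
    (PySem.List.slice table none (some max_header_rows)) rfl).symm
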